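-- pv_equiv track=rewrite | github.com/ShawHahnLab/igseqhelper | inst/python/igseqhelper/demux.py | _match_barcode
-- ===== SOURCE A (Python) =====
-- def _match_barcode(scores, max_mismatch, min_next_mismatch):
--     """Select the best-matching barcode from scores and thresholds."""
--     # The first and next-best scores
--     match_score = max(scores.values())
--     next_scores = [val for val in scores.values() if val < match_score]
--     # but there may not be a next best, so be careful
--     if next_scores:
--         match_score_second = max(next_scores)
--     else:
--         match_score_second = 0
--     # Match the best score with the first barcode that produced it
--     is_match = lambda b: scores[b] == match_score
--     match = [barcode for barcode in scores.keys() if is_match(barcode)][0]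
--     # Count the number of mismatches for the best and next best
--     # The N removal is only needed for fwd but is fine to leave the same for
--     # rev
--     mismatch = len(match.lstrip("N")) - match_score
--     mismatch_next = len(match.lstrip("N")) - match_score_second
--     # Invalidate the barcode match if it isn't definitive enough
--     if not (mismatch <= max_mismatch and mismatch_next >= min_next_mismatch):
--         match = None
--     return match
-- ===== SOURCE B (Python) =====
-- def _match_barcode(scores, max_mismatch, min_next_mismatch):
--     """Select the best-matching barcode from scores and thresholds.
--
--     Single pass over the items: track the first best-scoring barcode and the
--     best score strictly below it, instead of three separate scans.
--     """
--     if not scores: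
--         raise ValueError("max() arg is an empty sequence")
--     best = None
--     best_score = None
--     second = None
--     for barcode, score in scores.items():
--         if best is None or score > best_score:
--             if best_score is not None:
--                 second = best_score
--             best, best_score = barcode, score
--         elif score < best_score and (second is None or score > second):
--             second = score
--     if second is None:
--         second = 0
--     length = len(best.lstrip("N"))
--     if length - best_score <= max_mismatch and length - second >= min_next_mismatch:
--         return best
--     return None
-- ===== Notes on version B (the rewrite author's own statement) =====
-- stated objective: faster
-- what changed: Replaces A's three separate scans (max of values, list of smaller values + second max, list of argmax keys via dict lookups) by a single pass over the items that maintains the first best barcode, its score and the best strictly-smaller score.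
import Mathlib
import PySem

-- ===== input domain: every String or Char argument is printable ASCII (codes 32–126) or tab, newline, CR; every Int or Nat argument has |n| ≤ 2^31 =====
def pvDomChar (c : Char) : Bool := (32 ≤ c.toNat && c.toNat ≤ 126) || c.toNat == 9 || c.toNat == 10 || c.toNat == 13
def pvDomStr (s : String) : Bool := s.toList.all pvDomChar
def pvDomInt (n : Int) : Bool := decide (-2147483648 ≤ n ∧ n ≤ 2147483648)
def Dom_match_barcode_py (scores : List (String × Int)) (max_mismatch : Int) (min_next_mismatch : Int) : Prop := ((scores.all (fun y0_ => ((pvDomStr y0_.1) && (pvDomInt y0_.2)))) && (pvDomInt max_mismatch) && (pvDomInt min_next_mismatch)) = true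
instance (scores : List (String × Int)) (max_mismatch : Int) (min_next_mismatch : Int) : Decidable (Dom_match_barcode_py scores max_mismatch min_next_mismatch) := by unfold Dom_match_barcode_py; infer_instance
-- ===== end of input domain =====

-- B is a single pass keeping (first best barcode, best score, best strictly-smaller score)
-- instead of A's separate scans; return value only (no side effects in either).

-- ===== PORT A =====
-- A's scores is a dict; here it is the association list of its items in insertion order.
def match_barcode_py (scores : List (String × Int)) (max_mismatch : Int) (min_next_mismatch : Int) : Option String :=
  let vals := scores.map Prod.snd
  -- match_score = max(scores.values()); ValueError on empty, excluded by Pre_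
  match PySem.List.max? vals (fun v => v) with
  | none => none
  | some match_score =>
    let next_scores := vals.filter (fun v => decide (v < match_score))
    -- match_score_second = max(next_scores) if next_scores else 0 (max? is none exactly on [])
    let match_score_second := match PySem.List.max? next_scores (fun v => v) with
      | some m => m
      | none => 0
    -- [barcode for barcode in scores.keys() if scores[barcode] == match_score][0]
    let matchesL := (scores.map Prod.fst).filter
        (fun b => (PySem.Dict.mk scores).get? b == some match_score)
    match matchesL.head? with
    | none => none   -- IndexError; unreachable when keys are distinct (Pre_)
    | some m =>
      -- len(match.lstrip("N")): hand port of str.lstrip with a one-char set, exact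
      let mlen : Int := (m.toList.dropWhile (fun c => c == 'N')).length
      let mismatch := mlen - match_score
      let mismatch_next := mlen - match_score_second
      if ¬ (mismatch ≤ max_mismatch ∧ mismatch_next ≥ min_next_mismatch) then none
      else some m

-- ===== PORT B =====
-- single loop step: state = (best item so far if any, best strictly-smaller score so far)
def bcStep (st : Option (String × Int) × Option Int) (p : String × Int) :
    Option (String × Int) × Option Int :=
  match st with
  | (none, sec) => (some p, sec)
  | (some (b, bs), sec) =>
    if bs < p.2 then (some p, some bs)
    else if p.2 < bs ∧ (∀ s, sec = some s → s < p.2) then (some (b, bs), some p.2)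
    else (some (b, bs), sec)

def match_barcode_py_alt (scores : List (String × Int)) (max_mismatch : Int) (min_next_mismatch : Int) : Option String :=
  match scores.foldl bcStep (none, none) with
  | (none, _) => none   -- empty scores: the Python B raises ValueError; outside Pre_
  | (some (best, best_score), sec) =>
    let second := sec.getD 0
    let blen : Int := (best.toList.dropWhile (fun c => c == 'N')).length
    if blen - best_score ≤ max_mismatch ∧ blen - second ≥ min_next_mismatch then some best
    else none

-- ===== PRECONDITION & SPEC =====
-- Pre_ excludes empty scores, where A's max() raises ValueError (B raises ValueError too),
-- and association lists with duplicate keys, which do not represent any Python dict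
-- (scores is a dict in Python, so its keys are distinct).
def Pre_match_barcode_py (scores : List (String × Int)) (max_mismatch : Int) (min_next_mismatch : Int) : Prop :=
  scores ≠ [] ∧ (scores.map Prod.fst).Nodup

instance (scores : List (String × Int)) (max_mismatch : Int) (min_next_mismatch : Int) : Decidable (Pre_match_barcode_py scores max_mismatch min_next_mismatch) := by
  unfold Pre_match_barcode_py; infer_instance

def pvWitness_match_barcode_py : (List (String × Int)) × Int × Int :=
  ([("NACGT", 4), ("TTTT", 2)], 1, 2)

def Spec_match_barcode_py (scores : List (String × Int)) (max_mismatch : Int) (min_next_mismatch : Int) (out : Option String) : Prop := out = match_barcode_py_alt scores max_mismatch min_next_mismatch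
instance (scores : List (String × Int)) (max_mismatch : Int) (min_next_mismatch : Int) (out : Option String) : Decidable (Spec_match_barcode_py scores max_mismatch min_next_mismatch out) := by unfold Spec_match_barcode_py; infer_instance

-- ===== CLAIM (what is proved, stated in full; the proofs are below) =====
def Claim_equal_match_barcode_py : Prop := ∀ (scores : List (String × Int)) (max_mismatch : Int) (min_next_mismatch : Int), Dom_match_barcode_py scores max_mismatch min_next_mismatch → Pre_match_barcode_py scores max_mismatch min_next_mismatch → Spec_match_barcode_py scores max_mismatch min_next_mismatch (match_barcode_py scores max_mismatch min_next_mismatch)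

-- ===== LEMMAS AND PROOFS =====

-- reference "first best item" accumulator shared by the two characterizations
def firstMax : List (String × Int) → (String × Int) → (String × Int)
  | [], acc => acc
  | p :: t, acc => firstMax t (if acc.2 < p.2 then p else acc)

-- running max of an optional second-best over a value list
def maxO (o : Option Int) (l : List Int) : Option Int :=
  l.foldl (fun o v => some (o.elim v (fun s => max s v))) o

def oMax : Option Int → Option Int → Option Int
  | none, b => b
  | a, none => a
  | some x, some y => some (max x y)

lemma maxO_cons (o : Option Int) (v : Int) (l : List Int) :
    maxO o (v :: l) = maxO (oMax o (some v)) l := by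
  cases o <;> rfl

lemma maxO_some_eq_foldl (l : List Int) : ∀ a, maxO (some a) l = some (l.foldl max a) := by
  induction l with
  | nil => intro a; rfl
  | cons v l ih => intro a; rw [maxO_cons]; exact ih (max a v)

lemma maxO_none_eq_max? (l : List Int) :
    maxO none l = PySem.List.max? l (fun v => v) := by
  cases l with
  | nil => rfl
  | cons v l =>
    rw [maxO_cons]
    show maxO (some v) l = _
    rw [maxO_some_eq_foldl, PySem.List.max?_id_cons]

lemma firstMax_snd (t : List (String × Int)) : ∀ acc,
    (firstMax t acc).2 = (t.map Prod.snd).foldl max acc.2 := by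
  induction t with
  | nil => intro acc; rfl
  | cons p t ih =>
    intro acc
    show (firstMax t (if acc.2 < p.2 then p else acc)).2 = _
    rw [ih]
    have hb : (if acc.2 < p.2 then p else acc).2 = max acc.2 p.2 := by
      rw [max_def]; split_ifs <;> omega
    rw [hb]
    simp

lemma acc_snd_le_firstMax (t : List (String × Int)) (acc : String × Int) :
    acc.2 ≤ (firstMax t acc).2 := by
  rw [firstMax_snd]
  exact (PySem.List.le_foldl_max (t.map Prod.snd) acc.2).1

lemma mem_snd_le_firstMax (t : List (String × Int)) (acc : String × Int)
    (q : String × Int) (hq : q ∈ t) : q.2 ≤ (firstMax t acc).2 := by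
  rw [firstMax_snd]
  exact (PySem.List.le_foldl_max (t.map Prod.snd) acc.2).2 q.2 (List.mem_map_of_mem hq)

lemma firstMax_of_forall_le (t : List (String × Int)) : ∀ acc,
    (∀ q ∈ t, q.2 ≤ acc.2) → firstMax t acc = acc := by
  induction t with
  | nil => intro acc _; rfl
  | cons p t ih =>
    intro acc h
    show firstMax t (if acc.2 < p.2 then p else acc) = acc
    have hp : ¬ acc.2 < p.2 := not_lt.mpr (h p (by simp))
    rw [if_neg hp]
    exact ih acc (fun q hq => h q (by simp [hq]))

lemma find?_firstMax (t : List (String × Int)) : ∀ acc,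
    (acc :: t).find? (fun p => p.2 == (firstMax t acc).2) = some (firstMax t acc) := by
  induction t with
  | nil => intro acc; simp [firstMax, List.find?]
  | cons p t ih =>
    intro acc
    by_cases h : acc.2 < p.2
    · have hred : firstMax (p :: t) acc = firstMax t p := by simp [firstMax, if_pos h]
      rw [hred]
      have hpM : p.2 ≤ (firstMax t p).2 := acc_snd_le_firstMax t p
      rw [List.find?_cons_of_neg (by simp; omega)]
      exact ih p
    · have hred : firstMax (p :: t) acc = firstMax t acc := by simp [firstMax, if_neg h]
      rw [hred]
      have hle : p.2 ≤ acc.2 := not_lt.mp h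
      have haccM : acc.2 ≤ (firstMax t acc).2 := acc_snd_le_firstMax t acc
      by_cases heq : acc.2 = (firstMax t acc).2
      · have hfix : firstMax t acc = acc :=
          firstMax_of_forall_le t acc (fun q hq => by
            have := mem_snd_le_firstMax t acc q hq; omega)
        rw [List.find?_cons_of_pos (by simp [heq]), hfix]
      · have := ih acc
        rw [List.find?_cons_of_neg (by simp; omega)] at this
        rw [List.find?_cons_of_neg (by simp; omega),
            List.find?_cons_of_neg (by simp; omega)]
        exact this

lemma dict_get?_of_nodup (l : List (String × Int)) (p : String × Int) :
    (l.map Prod.fst).Nodup → p ∈ l → (PySem.Dict.mk l).get? p.1 = some p.2 := by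
  induction l with
  | nil => intro _ hp; cases hp
  | cons q l ih =>
    intro hnd hp
    rw [PySem.Dict.get?_mk_cons]
    rcases List.mem_cons.mp hp with h | h
    · subst h; simp
    · have hne : q.1 ≠ p.1 := by
        intro he
        have : p.1 ∈ l.map Prod.fst := List.mem_map_of_mem h
        rw [← he] at this
        exact (List.nodup_cons.mp (by simpa using hnd)).1 this
      rw [if_neg (by simpa using hne)]
      exact ih (List.nodup_cons.mp (by simpa using hnd)).2 h

lemma head?_filter_eq_find? {α : Type} (p : α → Bool) (l : List α) :
    (l.filter p).head? = l.find? p := by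
  induction l with
  | nil => rfl
  | cons x l ih =>
    by_cases h : p x
    · simp [h]
    · simp [h, ih]

lemma oMax_eq_right (o : Option Int) (v : Int) (h : ∀ s, o = some s → s ≤ v) :
    oMax o (some v) = some v := by
  cases o with
  | none => rfl
  | some s => have := h s rfl; simp [oMax]; omega

-- the single-pass loop, characterized: best = first maximal item, second = max of
-- the initial candidate and every value strictly below the final maximum
lemma bc_fold (t : List (String × Int)) : ∀ (b : String) (bs : Int) (sec : Option Int),
    (∀ s, sec = some s → s < bs) →
    t.foldl bcStep (some (b, bs), sec) =
      (some (firstMax t (b, bs)),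
       maxO sec ((bs :: t.map Prod.snd).filter
         (fun v => decide (v < (firstMax t (b, bs)).2)))) := by
  induction t with
  | nil =>
    intro b bs sec hsec
    simp [firstMax, maxO, List.filter]
  | cons p t ih =>
    intro b bs sec hsec
    rw [List.foldl_cons]
    have hfm1 : firstMax (p :: t) (b, bs) = firstMax t (if bs < p.2 then p else (b, bs)) := rfl
    by_cases h1 : bs < p.2
    · have hstep : bcStep (some (b, bs), sec) p = (some p, some bs) := by
        simp [bcStep, if_pos h1]
      rw [hstep, hfm1, if_pos h1]
      have hpM : p.2 ≤ (firstMax t p).2 := acc_snd_le_firstMax t p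
      have := ih p.1 p.2 (some bs) (by intro s hs; injection hs with hs; omega)
      simp only [Prod.mk.eta] at this
      rw [this]
      congr 1
      have hfil : (bs :: p.2 :: t.map Prod.snd).filter (fun v => decide (v < (firstMax t p).2))
          = bs :: (p.2 :: t.map Prod.snd).filter (fun v => decide (v < (firstMax t p).2)) := by
        rw [List.filter_cons, if_pos]; simp; omega
      rw [List.map_cons, hfil, maxO_cons,
          oMax_eq_right sec bs (fun s hs => le_of_lt (hsec s hs))]
    · by_cases h2 : p.2 < bs ∧ (∀ s, sec = some s → s < p.2)
      · have hstep : bcStep (some (b, bs), sec) p = (some (b, bs), some p.2) := by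
          simp only [bcStep]
          rw [if_neg h1, if_pos h2]
        rw [hstep, hfm1, if_neg h1]
        have hM : bs ≤ (firstMax t (b, bs)).2 := acc_snd_le_firstMax t (b, bs)
        rw [ih b bs (some p.2) (by intro s hs; injection hs with hs; omega), List.map_cons]
        congr 1
        rcases lt_or_eq_of_le hM with hlt | heq
        · -- bs is strictly below the final maximum: both lists keep it
          have e1 : (bs :: p.2 :: t.map Prod.snd).filter (fun v => decide (v < (firstMax t (b, bs)).2))
              = bs :: p.2 :: (t.map Prod.snd).filter (fun v => decide (v < (firstMax t (b, bs)).2)) := by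
            rw [List.filter_cons, if_pos (by simp; omega), List.filter_cons, if_pos (by simp; omega)]
          have e2 : (bs :: t.map Prod.snd).filter (fun v => decide (v < (firstMax t (b, bs)).2))
              = bs :: (t.map Prod.snd).filter (fun v => decide (v < (firstMax t (b, bs)).2)) := by
            rw [List.filter_cons, if_pos (by simp; omega)]
          rw [e1, e2, maxO_cons, maxO_cons, maxO_cons]
          congr 1
          cases sec with
          | none => simp [oMax]; omega
          | some s => have := hsec s rfl; simp [oMax]; omega
        · -- bs equals the final maximum: it is filtered out of both lists
          have e1 : (bs :: p.2 :: t.map Prod.snd).filter (fun v => decide (v < (firstMax t (b, bs)).2))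
              = p.2 :: (t.map Prod.snd).filter (fun v => decide (v < (firstMax t (b, bs)).2)) := by
            rw [List.filter_cons, if_neg (by simp; omega), List.filter_cons, if_pos (by simp; omega)]
          have e2 : (bs :: t.map Prod.snd).filter (fun v => decide (v < (firstMax t (b, bs)).2))
              = (t.map Prod.snd).filter (fun v => decide (v < (firstMax t (b, bs)).2)) := by
            rw [List.filter_cons, if_neg (by simp; omega)]
          rw [e1, e2, maxO_cons,
              oMax_eq_right sec p.2 (fun s hs => le_of_lt (h2.2 s hs))]
      · have hstep : bcStep (some (b, bs), sec) p = (some (b, bs), sec) := by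
          simp only [bcStep]
          rw [if_neg h1, if_neg h2]
        rw [hstep, hfm1, if_neg h1]
        have hM : bs ≤ (firstMax t (b, bs)).2 := acc_snd_le_firstMax t (b, bs)
        rw [ih b bs sec hsec, List.map_cons]
        congr 1
        have hple : p.2 ≤ bs := le_of_not_gt h1
        rcases eq_or_lt_of_le hple with hpeq | hplt
        · -- p.2 = bs: one absorbed duplicate of the running maximum
          rcases lt_or_eq_of_le hM with hlt | heq
          · have e1 : (bs :: p.2 :: t.map Prod.snd).filter (fun v => decide (v < (firstMax t (b, bs)).2))
                = bs :: p.2 :: (t.map Prod.snd).filter (fun v => decide (v < (firstMax t (b, bs)).2)) := by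
              rw [List.filter_cons, if_pos (by simp; omega), List.filter_cons, if_pos (by simp; omega)]
            have e2 : (bs :: t.map Prod.snd).filter (fun v => decide (v < (firstMax t (b, bs)).2))
                = bs :: (t.map Prod.snd).filter (fun v => decide (v < (firstMax t (b, bs)).2)) := by
              rw [List.filter_cons, if_pos (by simp; omega)]
            rw [e1, e2, maxO_cons, maxO_cons, maxO_cons]
            congr 1
            cases sec with
            | none => simp [oMax]; omega
            | some s => have := hsec s rfl; simp [oMax]; omega
          · have e1 : (bs :: p.2 :: t.map Prod.snd).filter (fun v => decide (v < (firstMax t (b, bs)).2))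
                = (t.map Prod.snd).filter (fun v => decide (v < (firstMax t (b, bs)).2)) := by
              rw [List.filter_cons, if_neg (by simp; omega), List.filter_cons, if_neg (by simp; omega)]
            have e2 : (bs :: t.map Prod.snd).filter (fun v => decide (v < (firstMax t (b, bs)).2))
                = (t.map Prod.snd).filter (fun v => decide (v < (firstMax t (b, bs)).2)) := by
              rw [List.filter_cons, if_neg (by simp; omega)]
            rw [e1, e2]
        · -- p.2 < bs and the stored second already dominates p.2
          have hsecp : ∃ s, sec = some s ∧ p.2 ≤ s := by
            cases hsec2 : sec with
            | none => exact absurd ⟨hplt, by intro s hs; rw [hsec2] at hs; cases hs⟩ h2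
            | some s =>
              refine ⟨s, rfl, ?_⟩
              by_contra hc
              exact h2 ⟨hplt, by intro u hu; rw [hsec2] at hu; injection hu with hu; omega⟩
          obtain ⟨s, rfl, hps⟩ := hsecp
          have hsb : s < bs := hsec s rfl
          rcases lt_or_eq_of_le hM with hlt | heq
          · have e1 : (bs :: p.2 :: t.map Prod.snd).filter (fun v => decide (v < (firstMax t (b, bs)).2))
                = bs :: p.2 :: (t.map Prod.snd).filter (fun v => decide (v < (firstMax t (b, bs)).2)) := by
              rw [List.filter_cons, if_pos (by simp; omega), List.filter_cons, if_pos (by simp; omega)]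
            have e2 : (bs :: t.map Prod.snd).filter (fun v => decide (v < (firstMax t (b, bs)).2))
                = bs :: (t.map Prod.snd).filter (fun v => decide (v < (firstMax t (b, bs)).2)) := by
              rw [List.filter_cons, if_pos (by simp; omega)]
            rw [e1, e2, maxO_cons, maxO_cons, maxO_cons]
            congr 1
            simp [oMax]; omega
          · have e1 : (bs :: p.2 :: t.map Prod.snd).filter (fun v => decide (v < (firstMax t (b, bs)).2))
                = p.2 :: (t.map Prod.snd).filter (fun v => decide (v < (firstMax t (b, bs)).2)) := by
              rw [List.filter_cons, if_neg (by simp; omega), List.filter_cons, if_pos (by simp; omega)]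
            have e2 : (bs :: t.map Prod.snd).filter (fun v => decide (v < (firstMax t (b, bs)).2))
                = (t.map Prod.snd).filter (fun v => decide (v < (firstMax t (b, bs)).2)) := by
              rw [List.filter_cons, if_neg (by simp; omega)]
            rw [e1, e2, maxO_cons]
            congr 1
            simp [oMax]; omega

theorem match_barcode_py_spec : Claim_equal_match_barcode_py := by
  intro scores max_mismatch min_next_mismatch _ hpre
  obtain ⟨hne, hnd⟩ := hpre
  unfold Spec_match_barcode_py
  cases scores with
  | nil => exact absurd rfl hne
  | cons x t =>
    rcases hfm : firstMax t x with ⟨bm, bv⟩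
    -- B's loop, characterized
    have hB : (x :: t).foldl bcStep (none, none) =
        (some (bm, bv), maxO none ((x.2 :: t.map Prod.snd).filter (fun v => decide (v < bv)))) := by
      rw [List.foldl_cons]
      have h0 : bcStep (none, none) x = (some x, none) := rfl
      rw [h0]
      have := bc_fold t x.1 x.2 none (by intro s hs; cases hs)
      simp only [Prod.mk.eta] at this
      rw [this, hfm]
    -- A's pieces
    have hmax : PySem.List.max? ((x :: t).map Prod.snd) (fun v => v) = some bv := by
      rw [List.map_cons, PySem.List.max?_id_cons, ← firstMax_snd, hfm]
    have hkeys : ((x :: t).map Prod.fst).filter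
          (fun k => (PySem.Dict.mk (x :: t)).get? k == some bv)
        = ((x :: t).filter (fun p => p.2 == bv)).map Prod.fst := by
      rw [List.filter_map]
      congr 1
      apply List.filter_congr
      intro p hp
      simp [Function.comp, dict_get?_of_nodup (x :: t) p hnd hp]
    have hfind : (x :: t).find? (fun p => p.2 == bv) = some (bm, bv) := by
      have := find?_firstMax t x
      rw [hfm] at this
      exact this
    have hhead : (((x :: t).filter (fun p => p.2 == bv)).map Prod.fst).head? = some bm := by
      rw [List.head?_map, head?_filter_eq_find?, hfind]
      rfl
    simp only [match_barcode_py, match_barcode_py_alt, hB, hmax, hkeys, hhead]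
    rw [maxO_none_eq_max?]
    simp only [List.map_cons]
    have hmg : ∀ o : Option Int, (match o with | some m => m | none => (0 : Int)) = o.getD 0 := by
      intro o; cases o <;> rfl
    simp only [hmg]
    by_cases hc : ((bm.toList.dropWhile (fun c => c == 'N')).length : Int) - bv ≤ max_mismatch ∧
        ((bm.toList.dropWhile (fun c => c == 'N')).length : Int) -
          (PySem.List.max? ((x.2 :: t.map Prod.snd).filter (fun v => decide (v < bv)))
            (fun v => v)).getD 0 ≥ min_next_mismatch
    · rw [if_neg (not_not_intro hc), if_pos hc]
    · rw [if_pos hc, if_neg hc]
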